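-- pv_equiv track=rewrite | github.com/zhetian592/my-crawler-monitor | crawler.py | get_source_priority
-- ===== SOURCE A (Python) =====
-- def get_source_priority(source_name: str) -> int:
--     high_priority = {"uscc", "cecc", "chinaselect", "odni", "state", "gov"}
--     think_tank = {"brookings", "csis", "merics", "aspi", "jamestown", "hrw", "amnesty", "freedomhouse"}
--     news = {"bbc", "dw", "rfi", "nytimes", "reuters", "wsj", "ft", "ap", "nikkei"}
--     src_lower = source_name.lower()
--     if any(k in src_lower for k in high_priority):
--         return 1
--     if any(k in src_lower for k in think_tank):
--         return 2
--     if any(k in src_lower for k in news):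
--         return 3
--     return 4
-- ===== SOURCE B (Python) =====
-- _PRIORITY_BY_KEYWORD = {
--     "uscc": 1, "cecc": 1, "chinaselect": 1, "odni": 1, "state": 1, "gov": 1,
--     "brookings": 2, "csis": 2, "merics": 2, "aspi": 2, "jamestown": 2,
--     "hrw": 2, "amnesty": 2, "freedomhouse": 2,
--     "bbc": 3, "dw": 3, "rfi": 3, "nytimes": 3, "reuters": 3, "wsj": 3,
--     "ft": 3, "ap": 3, "nikkei": 3,
-- }
--
-- def get_source_priority(source_name: str) -> int:
--     src = source_name.lower()
--     best = 4
--     for keyword, priority in _PRIORITY_BY_KEYWORD.items():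
--         if keyword in src:
--             best = min(best, priority)
--     return best
-- ===== Notes on version B (the rewrite author's own statement) =====
-- stated objective: simpler
-- what changed: Replaces the three sequential any()-cascade branches over three sets with one keyword->priority table and a single accumulating min-pass (default 4), relying on tier order matching numeric priority.
import Mathlib
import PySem

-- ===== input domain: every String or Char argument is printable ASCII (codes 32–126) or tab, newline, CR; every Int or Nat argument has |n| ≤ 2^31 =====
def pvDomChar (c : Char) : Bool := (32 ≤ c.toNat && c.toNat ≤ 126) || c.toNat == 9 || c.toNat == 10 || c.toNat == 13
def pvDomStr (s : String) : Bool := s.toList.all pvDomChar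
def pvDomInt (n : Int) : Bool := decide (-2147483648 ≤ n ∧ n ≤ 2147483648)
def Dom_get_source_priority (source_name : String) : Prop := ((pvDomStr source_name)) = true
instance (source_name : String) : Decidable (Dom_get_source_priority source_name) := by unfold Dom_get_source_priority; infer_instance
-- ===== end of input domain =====

-- B replaces A's three short-circuiting any()-branches with one keyword->priority table and a single accumulating min-pass (objective: simpler).


-- ===== PORT A =====
def get_source_priority (source_name : String) : Int :=
  let high_priority : PySem.Set String := PySem.Set.ofList ["uscc", "cecc", "chinaselect", "odni", "state", "gov"]
  let think_tank : PySem.Set String := PySem.Set.ofList ["brookings", "csis", "merics", "aspi", "jamestown", "hrw", "amnesty", "freedomhouse"]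
  let news : PySem.Set String := PySem.Set.ofList ["bbc", "dw", "rfi", "nytimes", "reuters", "wsj", "ft", "ap", "nikkei"]
  let src_lower := PySem.Str.lower source_name
  if high_priority.any (fun k => PySem.Str.isIn k src_lower) then 1
  else if think_tank.any (fun k => PySem.Str.isIn k src_lower) then 2
  else if news.any (fun k => PySem.Str.isIn k src_lower) then 3
  else 4

-- ===== PORT B =====
def priorityByKeyword : List (String × Int) :=
  [("uscc", 1), ("cecc", 1), ("chinaselect", 1), ("odni", 1), ("state", 1), ("gov", 1),
   ("brookings", 2), ("csis", 2), ("merics", 2), ("aspi", 2), ("jamestown", 2),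
   ("hrw", 2), ("amnesty", 2), ("freedomhouse", 2),
   ("bbc", 3), ("dw", 3), ("rfi", 3), ("nytimes", 3), ("reuters", 3), ("wsj", 3),
   ("ft", 3), ("ap", 3), ("nikkei", 3)]

def get_source_priority_alt (source_name : String) : Int :=
  let src := PySem.Str.lower source_name
  priorityByKeyword.foldl
    (fun best kp => if PySem.Str.isIn kp.1 src then min best kp.2 else best) 4

-- ===== PRECONDITION & SPEC =====
def Spec_get_source_priority (source_name : String) (out : Int) : Prop := out = get_source_priority_alt source_name
instance (source_name : String) (out : Int) : Decidable (Spec_get_source_priority source_name out) := by unfold Spec_get_source_priority; infer_instance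

-- ===== CLAIM (what is proved, stated in full; the proofs are below) =====
def Claim_equal_get_source_priority : Prop := ∀ (source_name : String), Dom_get_source_priority source_name → Spec_get_source_priority source_name (get_source_priority source_name)

-- ===== LEMMAS AND PROOFS =====

-- B's min-fold over a constant-priority group = "match anywhere -> min acc p, else acc" (abstract predicate).
theorem fold_const_group (f : String → Bool) (p : Int) (g : List String) (acc : Int) :
    (g.map (fun k => (k, p))).foldl
        (fun best kp => if f kp.1 then min best kp.2 else best) acc
      = if g.any f then min acc p else acc := by
  induction g generalizing acc with
  | nil => simp
  | cons k rest ih =>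
    simp only [List.map_cons, List.foldl_cons, List.any_cons]
    by_cases h : f k
    · simp [h, ih]
    · simp [h, ih]

-- the same, with the predicate in the syntactic shape B's port uses (for rw)
theorem fold_const_group' (src : String) (p : Int) (g : List String) (acc : Int) :
    (g.map (fun k => (k, p))).foldl
        (fun best kp => if PySem.Str.isIn kp.1 src then min best kp.2 else best) acc
      = if g.any (fun k => PySem.Str.isIn k src) then min acc p else acc :=
  fold_const_group (fun k => PySem.Str.isIn k src) p g acc

-- the three-stage min accumulation equals A's first-match cascade (tier order = numeric priority)
theorem cascade_min (b1 b2 b3 : Bool) :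
    (if b3 then
        min (if b2 then min (if b1 then min (4 : Int) 1 else 4) 2
             else if b1 then min (4 : Int) 1 else 4) 3
      else if b2 then min (if b1 then min (4 : Int) 1 else 4) 2
      else if b1 then min (4 : Int) 1 else 4)
      = if b1 then 1 else if b2 then 2 else if b3 then 3 else 4 := by
  cases b1 <;> cases b2 <;> cases b3 <;> decide

-- ===== VERDICT (by name: the statement is the Claim_ definition above) =====
theorem get_source_priority_spec : Claim_equal_get_source_priority := by
  intro source_name _
  unfold Spec_get_source_priority get_source_priority get_source_priority_alt
  have htab : priorityByKeyword =
      (["uscc", "cecc", "chinaselect", "odni", "state", "gov"].map (fun k => (k, (1 : Int)))) ++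
      (["brookings", "csis", "merics", "aspi", "jamestown", "hrw", "amnesty", "freedomhouse"].map (fun k => (k, (2 : Int)))) ++
      (["bbc", "dw", "rfi", "nytimes", "reuters", "wsj", "ft", "ap", "nikkei"].map (fun k => (k, (3 : Int)))) := by
    rfl
  rw [htab, List.foldl_append, List.foldl_append,
      fold_const_group', fold_const_group', fold_const_group']
  exact (cascade_min _ _ _).symm
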